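-- pv_equiv track=rewrite | github.com/LeeHeonWoo1/CodingTest | Programmers/Lv_0/make_array2.py | solution
-- ===== SOURCE A (Python) =====
-- def solution(l, r):
--     answer = []
--     a_func = lambda x : '5' in str(x) or '0' in str(x)
--     array = list(filter(a_func, range(l, r+1)))
--
--     for element in array:
--         if len(str(element).replace('5', '').replace('0', '')) == 0:
--             answer.append(element)
--
--     if len(answer) == 0:
--         answer.append(-1)
--
--     return answer
-- ===== SOURCE B (Python) =====
-- def solution(l, r):
--     # Generate the numbers made only of digits 0 and 5 directly (0, then
--     # 5, 50, 55, 500, ... level by level) instead of scanning the whole range.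
--     cands = [0]
--     level = [5]
--     for _ in range(len(str(max(r, 0)))):
--         cands.extend(level)
--         level = [10 * x + d for x in level for d in (0, 5)]
--     ans = [x for x in cands if l <= x <= r]
--     return ans if ans else [-1]
-- ===== Notes on version B (the rewrite author's own statement) =====
-- stated objective: faster
-- what changed: Instead of scanning every integer in [l, r] and testing its decimal string, B generates the numbers made only of digits 0 and 5 combinatorially (0, then 5, 50, 55, ... level by level up to the digit count of r) and filters them to the range.
import Mathlib
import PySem

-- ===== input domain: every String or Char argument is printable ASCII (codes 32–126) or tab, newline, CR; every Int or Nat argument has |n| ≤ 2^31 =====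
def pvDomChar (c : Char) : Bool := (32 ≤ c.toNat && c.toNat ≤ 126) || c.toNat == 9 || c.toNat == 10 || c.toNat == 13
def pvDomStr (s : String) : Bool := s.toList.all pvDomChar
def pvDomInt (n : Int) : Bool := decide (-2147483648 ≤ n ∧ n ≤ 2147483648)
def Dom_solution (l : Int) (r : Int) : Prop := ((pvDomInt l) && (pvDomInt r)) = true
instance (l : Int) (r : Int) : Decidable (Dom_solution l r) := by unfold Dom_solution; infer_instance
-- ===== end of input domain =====

-- B generates the numbers made only of digits 0 and 5 combinatorially (level by level) and filters
-- them to [l, r], instead of A's scan of every integer of the range with decimal-string tests.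


-- ===== PORT A =====
def solution (l : Int) (r : Int) : List Int :=
  let a_func : Int → Bool := fun x =>
    PySem.Str.isIn "5" (PySem.Int.toStr x) || PySem.Str.isIn "0" (PySem.Int.toStr x)
  let array : List Int := (PySem.List.pyRange l (r + 1) 1).filter a_func
  let answer : List Int := array.foldl (fun answer element =>
    if PySem.Str.len (PySem.Str.replace (PySem.Str.replace (PySem.Int.toStr element) "5" "") "0" "") = 0
    then answer ++ [element] else answer) []
  if PySem.List.len answer = 0 then answer ++ [-1] else answer

-- ===== PORT B =====
def solution_alt (l : Int) (r : Int) : List Int :=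
  let iters : Nat := (PySem.Str.len (PySem.Int.toStr (max r 0))).toNat
  let st : List Int × List Int := (List.range iters).foldl
    (fun st _ => (st.1 ++ st.2, st.2.flatMap (fun x => [10 * x + 0, 10 * x + 5]))) ([0], [5])
  let ans : List Int := st.1.filter (fun x => decide (l ≤ x) && decide (x ≤ r))
  if ans = [] then [-1] else ans

-- ===== PRECONDITION & SPEC =====
def Spec_solution (l : Int) (r : Int) (out : List Int) : Prop := out = solution_alt l r
instance (l : Int) (r : Int) (out : List Int) : Decidable (Spec_solution l r out) := by unfold Spec_solution; infer_instance

-- ===== CLAIM (what is proved, stated in full; the proofs are below) =====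
def Claim_equal_solution : Prop := ∀ (l : Int) (r : Int), Dom_solution l r → Spec_solution l r (solution l r)

-- ===== LEMMAS AND PROOFS =====

def dg (n : Nat) : List Char :=
  if n < 10 then [Nat.digitChar n] else dg (n / 10) ++ [Nat.digitChar (n % 10)]
  decreasing_by exact Nat.div_lt_self (by omega) (by omega)

lemma dg_low (n : Nat) (h : n < 10) : dg n = [Nat.digitChar n] := by
  rw [dg, if_pos h]

lemma dg_high (n : Nat) (h : 10 ≤ n) :
    dg n = dg (n / 10) ++ [Nat.digitChar (n % 10)] := by
  rw [dg, if_neg (by omega)]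

lemma toDigitsCore_eq_dg (f n : Nat) (acc : List Char) (h : n < f) :
    Nat.toDigitsCore 10 f n acc = dg n ++ acc := by
  induction f generalizing n acc with
  | zero => omega
  | succ f ih =>
    rw [Nat.toDigitsCore]
    by_cases h10 : n / 10 = 0
    · simp only [h10]
      rw [dg_low n (by omega)]
      have : n % 10 = n := by omega
      simp [this]
    · rw [if_neg h10, ih (n / 10) _ (by omega), dg_high n (by omega)]
      simp

lemma replace_go_filter (a : Char) (f : Nat) (l acc : List Char) (h : l.length ≤ f) :
    PySem.Chars.replace.go [a] [] f l acc = acc.reverse ++ l.filter (fun c => c != a) := by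
  induction f generalizing l acc with
  | zero =>
    have : l = [] := by cases l <;> simp_all
    subst this; rw [PySem.Chars.replace.go]; simp
  | succ f ih =>
    cases l with
    | nil =>
      rw [PySem.Chars.replace.go] <;> simp
    | cons c t =>
      rw [PySem.Chars.replace.go]
      by_cases hc : a = c
      · subst hc
        simp only [List.isPrefixOf, BEq.rfl, Bool.and_true, if_pos]
        rw [ih _ _ (by simpa using Nat.le_of_succ_le_succ (by simpa using h))]
        simp
      · have hp : ([a].isPrefixOf (c :: t)) = false := by
          simp [List.isPrefixOf, hc]
        rw [hp]
        simp only [Bool.false_eq_true, ite_false]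
        rw [ih _ _ (by simpa using h)]
        simp [bne, Ne.symm hc]

lemma replace_single (a : Char) (l : List Char) :
    PySem.Chars.replace l [a] [] = l.filter (fun c => c != a) := by
  rw [PySem.Chars.replace]
  simp only [List.isEmpty_cons, ite_false, Bool.false_eq_true]
  rw [replace_go_filter a l.length l [] (le_refl _)]
  simp

def d05 (n : Nat) : Bool :=
  if n = 0 then true else (decide (n % 10 = 0) || decide (n % 10 = 5)) && d05 (n / 10)
  decreasing_by exact Nat.div_lt_self (by omega) (by omega)

def chars05 (cs : List Char) : Bool := cs.all (fun c => c == '0' || c == '5')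

lemma d05_small (m : Nat) (h : m < 10) : d05 m = decide (m = 0 ∨ m = 5) := by
  rw [d05]
  interval_cases m <;> simp [d05]

lemma digitChar05 (m : Nat) (h : m < 10) :
    (Nat.digitChar m == '0' || Nat.digitChar m == '5') = (decide (m = 0) || decide (m = 5)) := by
  interval_cases m <;> rfl

lemma dg_ne_nil (n : Nat) : dg n ≠ [] := by
  by_cases h : n < 10
  · rw [dg_low n h]; simp
  · rw [dg_high n (by omega)]; simp

lemma chars05_dg (n : Nat) : chars05 (dg n) = d05 n := by
  induction n using Nat.strong_induction_on with
  | _ n ih =>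
    by_cases h : n < 10
    · rw [dg_low n h]
      simp only [chars05, List.all_cons, List.all_nil, Bool.and_true]
      rw [digitChar05 n h, d05_small n h]
      by_cases h0 : n = 0 <;> by_cases h5 : n = 5 <;> simp [h0, h5]
    · rw [dg_high n (by omega)]
      simp only [chars05, List.all_append, List.all_cons, List.all_nil, Bool.and_true]
      rw [show (List.all (dg (n / 10)) fun c => c == '0' || c == '5') = chars05 (dg (n / 10)) from rfl]
      rw [ih (n / 10) (by omega), digitChar05 (n % 10) (by omega)]
      conv_rhs => rw [d05, if_neg (by omega)]
      rw [Bool.and_comm]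

lemma toDigits_eq_dg (n : Nat) : Nat.toDigits 10 n = dg n := by
  simpa using toDigitsCore_eq_dg (n + 1) n [] (by omega)

lemma toChars_nonneg (x : Int) (h : 0 ≤ x) : PySem.Int.toChars x = dg x.toNat := by
  unfold PySem.Int.toChars
  rw [if_neg (by omega), toDigits_eq_dg]

lemma chars05_toChars (x : Int) :
    chars05 (PySem.Int.toChars x) = (decide (0 ≤ x) && d05 x.toNat) := by
  by_cases h : 0 ≤ x
  · rw [toChars_nonneg x h, chars05_dg]
    simp [h]
  · unfold PySem.Int.toChars
    rw [if_pos (by omega)]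
    simp [chars05, h]

lemma condA_iff (x : Int) :
    (PySem.Str.len (PySem.Str.replace (PySem.Str.replace (PySem.Int.toStr x) "5" "") "0" "") = 0)
      ↔ chars05 (PySem.Int.toChars x) = true := by
  rw [PySem.Str.len]
  simp only [PySem.Str.toList_replace, PySem.Int.toList_toStr]
  rw [show ("5" : String).toList = ['5'] from rfl, show ("0" : String).toList = ['0'] from rfl,
      show ("" : String).toList = [] from rfl]
  rw [replace_single, replace_single]
  simp only [List.filter_filter]
  constructor
  · intro h
    have h2 : ∀ c ∈ PySem.Int.toChars x, ¬((c != '0') && (c != '5')) = true := by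
      rw [← List.filter_eq_nil_iff]
      have := List.length_eq_zero_iff.mp (by exact_mod_cast h)
      exact this
    simp only [chars05, List.all_eq_true]
    intro c hc
    have := h2 c hc
    simp only [bne, Bool.and_eq_true, Bool.not_eq_true'] at this ⊢
    rcases Decidable.not_and_iff_or_not.mp this with h' | h' <;> simp_all
  · intro h
    have : List.filter (fun c => (c != '0') && (c != '5')) (PySem.Int.toChars x) = [] := by
      rw [List.filter_eq_nil_iff]
      intro c hc
      simp only [chars05, List.all_eq_true] at h
      have := h c hc
      simp only [bne, Bool.and_eq_true, Bool.not_eq_true'] at *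
      rcases Bool.or_eq_true_iff.mp this with h' | h' <;> simp_all
    rw [this]
    rfl

lemma singleton_infix_iff (a : Char) (l : List Char) : [a] <:+: l ↔ a ∈ l := by
  constructor
  · intro h
    exact h.mem (by simp)
  · intro h
    obtain ⟨s, t, rfl⟩ := List.append_of_mem h
    exact ⟨s, t, by simp⟩

lemma aFunc_of_chars05 (x : Int) (h : chars05 (PySem.Int.toChars x) = true) :
    (PySem.Str.isIn "5" (PySem.Int.toStr x) || PySem.Str.isIn "0" (PySem.Int.toStr x)) = true := by
  have h0 : 0 ≤ x := by
    by_contra hneg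
    rw [chars05_toChars] at h
    simp [hneg] at h
  have hne : PySem.Int.toChars x ≠ [] := by
    rw [toChars_nonneg x h0]; exact dg_ne_nil _
  obtain ⟨c, cs, hcons⟩ := List.exists_cons_of_ne_nil hne
  have hc : c ∈ PySem.Int.toChars x := by rw [hcons]; simp
  have := (List.all_eq_true.mp h) c hc
  simp only [Bool.or_eq_true, beq_iff_eq] at this
  simp only [Bool.or_eq_true, PySem.Str.isIn_iff_infix, PySem.Int.toList_toStr,
    show ("5" : String).toList = ['5'] from rfl, show ("0" : String).toList = ['0'] from rfl,
    singleton_infix_iff]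
  rcases this with h' | h'
  · right; rw [← h']; exact hc
  · left; rw [← h']; exact hc

def lvl : Nat → List Int
  | 0 => [5]
  | j + 1 => (lvl j).flatMap (fun x => [10 * x + 0, 10 * x + 5])

def cands (k : Nat) : List Int := 0 :: (List.range k).flatMap lvl

lemma d05_zero : d05 0 = true := by rw [d05]; simp

lemma d05_cons (y d : Nat) (hd : d = 0 ∨ d = 5) : d05 (10 * y + d) = d05 y := by
  by_cases h0 : 10 * y + d = 0
  · have hy : y = 0 := by omega
    rw [h0, hy]
  · rw [d05, if_neg h0]
    have h1 : (10 * y + d) % 10 = d := by omega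
    have h2 : (10 * y + d) / 10 = y := by omega
    rw [h1, h2]
    rcases hd with rfl | rfl <;> simp

lemma mem_lvl (j : Nat) (x : Int) :
    x ∈ lvl j ↔ (5 * 10 ^ j ≤ x ∧ x < 10 ^ (j + 1) ∧ d05 x.toNat = true) := by
  induction j generalizing x with
  | zero =>
    simp only [lvl, List.mem_singleton, pow_zero, mul_one]
    constructor
    · rintro rfl
      refine ⟨by norm_num, by norm_num, ?_⟩
      show d05 (5 : Int).toNat = true
      rw [show (5 : Int).toNat = 5 from rfl, d05_small 5 (by omega)]
      simp
    · rintro ⟨h5, h10, hd⟩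
      rw [d05_small x.toNat (by omega)] at hd
      simp at hd
      omega
  | succ j ih =>
    have hpow : ((10 : Int)) ^ (j + 1) = 10 * 10 ^ j := by ring
    have hpow2 : ((10 : Int)) ^ (j + 2) = 10 * 10 ^ (j + 1) := by ring
    have hppos : (0 : Int) < 10 ^ j := by positivity
    have hppos1 : (0 : Int) < 10 ^ (j + 1) := by positivity
    simp only [lvl, List.mem_flatMap, List.mem_cons, List.not_mem_nil, or_false]
    constructor
    · rintro ⟨y, hy, hx⟩
      obtain ⟨hy5, hy10, hyd⟩ := (ih y).mp hy
      have hy0 : 0 ≤ y := by nlinarith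
      have htn : ∀ d : Nat, (d = 0 ∨ d = 5) → x = 10 * y + (d : Int) →
          d05 x.toNat = true := by
        intro d hd hx
        have : x.toNat = 10 * y.toNat + d := by omega
        rw [this, d05_cons y.toNat d hd]
        exact hyd
      rcases hx with rfl | rfl
      · refine ⟨by rw [pow_succ]; nlinarith, by rw [hpow2, hpow]; nlinarith, ?_⟩
        exact htn 0 (by left; rfl) (by norm_num)
      · refine ⟨by rw [pow_succ]; nlinarith, by rw [hpow2, hpow]; nlinarith, ?_⟩
        exact htn 5 (by right; rfl) (by norm_num)
    · rintro ⟨h5, h10, hd⟩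
      have hx0 : (0:Int) < x := by nlinarith
      set m := x.toNat with hm
      have hmx : (m : Int) = x := by omega
      have hc0 : (((10:Nat) ^ j : Nat) : Int) = 10 ^ j := by push_cast; ring
      have hc1 : (((10:Nat) ^ (j+1) : Nat) : Int) = 10 ^ (j+1) := by push_cast; ring
      have hc2 : (((10:Nat) ^ (j+2) : Nat) : Int) = 10 ^ (j+2) := by push_cast; ring
      have hs1 : (10:Nat) ^ (j+1) = 10 ^ j * 10 := pow_succ 10 j
      have hs2 : (10:Nat) ^ (j+2) = 10 ^ j * 10 * 10 := by rw [pow_succ, pow_succ]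
      have hn1 : 5 * ((10:Nat) ^ j * 10) ≤ m := by omega
      have hn2 : m < (10:Nat) ^ j * 10 * 10 := by omega
      rw [d05, if_neg (by omega)] at hd
      simp only [Bool.and_eq_true, Bool.or_eq_true, decide_eq_true_eq] at hd
      obtain ⟨hdig, hrest⟩ := hd
      refine ⟨((m / 10 : Nat) : Int), ?_, ?_⟩
      · rw [ih]
        refine ⟨by omega, by omega, by rw [Int.toNat_natCast]; exact hrest⟩
      · have heq : x = 10 * ((m / 10 : Nat) : Int) + ((m % 10 : Nat) : Int) := by omega
        rcases hdig with h' | h'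
        · left; rw [heq, h']; norm_num
        · right; rw [heq, h']; norm_num

lemma exists_level (n : Nat) (h5 : 5 ≤ n) (hd : d05 n = true) :
    ∃ j, 5 * 10 ^ j ≤ n ∧ n < 10 ^ (j + 1) := by
  induction n using Nat.strong_induction_on with
  | _ n ih =>
    by_cases h : n < 10
    · refine ⟨0, by simpa using h5, by simpa using h⟩
    · rw [d05, if_neg (by omega)] at hd
      simp only [Bool.and_eq_true, Bool.or_eq_true, decide_eq_true_eq] at hd
      obtain ⟨hdig, hrest⟩ := hd
      have hy1 : 1 ≤ n / 10 := by omega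
      have hy5 : 5 ≤ n / 10 := by
        by_contra hlt
        rw [d05_small (n / 10) (by omega)] at hrest
        simp at hrest
        omega
      obtain ⟨j, hj1, hj2⟩ := ih (n / 10) (by omega) hy5 hrest
      refine ⟨j + 1, ?_, ?_⟩ <;>
        · rw [pow_succ] at *
          omega

lemma lt_pow_dg_len (n : Nat) : n < 10 ^ (dg n).length := by
  induction n using Nat.strong_induction_on with
  | _ n ih =>
    by_cases h : n < 10
    · rw [dg_low n h]; simpa using h
    · rw [dg_high n (by omega)]
      have := ih (n / 10) (by omega)
      simp only [List.length_append, List.length_cons, List.length_nil]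
      rw [pow_succ]
      omega

lemma mem_cands (k : Nat) (x : Int) :
    x ∈ cands k ↔ (x = 0 ∨ (5 ≤ x ∧ x < 10 ^ k ∧ d05 x.toNat = true)) := by
  unfold cands
  simp only [List.mem_cons, List.mem_flatMap, List.mem_range]
  constructor
  · rintro (rfl | ⟨j, hj, hx⟩)
    · left; rfl
    · right
      obtain ⟨h1, h2, h3⟩ := (mem_lvl j x).mp hx
      have hp1 : (0:Int) < 10 ^ j := by positivity
      have hple : (10:Int) ^ (j + 1) ≤ 10 ^ k := by
        exact pow_le_pow_right₀ (by norm_num) (by omega)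
      exact ⟨by nlinarith, by omega, h3⟩
  · rintro (rfl | ⟨h5, hk, hd⟩)
    · left; rfl
    · right
      have hx0 : (0:Int) < x := by omega
      have hmn : 5 ≤ x.toNat := by omega
      obtain ⟨j, hj1, hj2⟩ := exists_level x.toNat hmn hd
      have hc1 : ((5 * 10 ^ j : Nat) : Int) = 5 * 10 ^ j := by push_cast; ring
      have hc2 : ((10 ^ (j+1) : Nat) : Int) = 10 ^ (j+1) := by push_cast; ring
      have hjk : j < k := by
        by_contra hge
        have hkj : (10:Nat) ^ k ≤ 10 ^ j := Nat.pow_le_pow_right (by omega) (by omega)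
        have hxk : x.toNat < 10 ^ k := by
          have hck : ((10 ^ k : Nat) : Int) = 10 ^ k := by push_cast; ring
          omega
        omega
      refine ⟨j, hjk, (mem_lvl j x).mpr ⟨by omega, by omega, hd⟩⟩

lemma flatMap_pairwise (l : List Int) (h : l.Pairwise (· < ·)) :
    (l.flatMap (fun x => [10 * x + 0, 10 * x + 5])).Pairwise (· < ·) := by
  induction l with
  | nil => simp
  | cons a t ih =>
    rw [List.pairwise_cons] at h
    simp only [List.flatMap_cons]
    rw [List.pairwise_append]
    refine ⟨by simp, ih h.2, ?_⟩
    intro z hz w hw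
    simp only [List.mem_cons, List.not_mem_nil, or_false] at hz
    simp only [List.mem_flatMap, List.mem_cons, List.not_mem_nil, or_false] at hw
    obtain ⟨b, hb, hwb⟩ := hw
    have hab : a < b := h.1 b hb
    rcases hz with rfl | rfl <;> rcases hwb with rfl | rfl <;> omega

lemma lvl_pairwise (j : Nat) : (lvl j).Pairwise (· < ·) := by
  induction j with
  | zero => simp [lvl]
  | succ j ih => exact flatMap_pairwise _ ih

lemma cands_pairwise (k : Nat) : (cands k).Pairwise (· < ·) := by
  unfold cands
  rw [List.pairwise_cons]
  constructor
  · intro x hx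
    simp only [List.mem_flatMap, List.mem_range] at hx
    obtain ⟨j, _, hxl⟩ := hx
    obtain ⟨h1, _, _⟩ := (mem_lvl j x).mp hxl
    have : (0:Int) < 10 ^ j := by positivity
    nlinarith
  · induction k with
    | zero => simp
    | succ k ihk =>
      rw [List.range_succ, List.flatMap_append, List.pairwise_append]
      refine ⟨ihk, by simpa using lvl_pairwise k, ?_⟩
      intro z hz w hw
      simp only [List.mem_flatMap, List.mem_range] at hz
      simp only [List.flatMap_cons, List.flatMap_nil, List.append_nil] at hw
      obtain ⟨j, hj, hzl⟩ := hz
      obtain ⟨_, hz2, _⟩ := (mem_lvl j z).mp hzl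
      obtain ⟨hw1, _, _⟩ := (mem_lvl k w).mp hw
      have h1 : (10:Int) ^ (j + 1) ≤ 10 ^ k := pow_le_pow_right₀ (by norm_num) (by omega)
      have h2 : (0:Int) < 10 ^ k := by positivity
      nlinarith

lemma fold_eq_cands (k : Nat) :
    (List.range k).foldl
      (fun (st : List Int × List Int) _ =>
        (st.1 ++ st.2, st.2.flatMap (fun x => [10 * x + 0, 10 * x + 5]))) ([0], [5])
      = (cands k, lvl k) := by
  induction k with
  | zero => simp [cands, lvl]
  | succ k ih =>
    rw [List.range_succ, List.foldl_append, ih]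
    simp only [List.foldl_cons, List.foldl_nil]
    have h1 : cands k ++ lvl k = cands (k + 1) := by
      unfold cands
      rw [List.range_succ, List.flatMap_append]
      simp
    rw [h1]
    rfl

lemma predA_eq (x : Int) :
    (decide (PySem.Str.len (PySem.Str.replace (PySem.Str.replace (PySem.Int.toStr x) "5" "") "0" "") = 0)
      && (PySem.Str.isIn "5" (PySem.Int.toStr x) || PySem.Str.isIn "0" (PySem.Int.toStr x)))
    = (decide (0 ≤ x) && d05 x.toNat) := by
  rw [← chars05_toChars]
  by_cases h : chars05 (PySem.Int.toChars x) = true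
  · rw [h, aFunc_of_chars05 x h, decide_eq_true ((condA_iff x).mpr h)]
    simp
  · have hf : chars05 (PySem.Int.toChars x) = false := by simpa using h
    rw [hf, decide_eq_false (fun hlen => h ((condA_iff x).mp hlen))]
    simp

def solutionA2 (l r : Int) : List Int :=
  let ans := (PySem.List.pyRange l (r + 1) 1).filter (fun x => decide (0 ≤ x) && d05 x.toNat)
  if ans = [] then [-1] else ans

lemma solution_eq_filter (l r : Int) : solution l r = solutionA2 l r := by
  unfold solution solutionA2
  dsimp only
  have hfun : (fun (answer : List Int) (element : Int) =>
      if PySem.Str.len (PySem.Str.replace (PySem.Str.replace (PySem.Int.toStr element) "5" "") "0" "") = 0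
      then answer ++ [element] else answer)
    = (fun (answer : List Int) (element : Int) =>
      if (fun e : Int => decide (PySem.Str.len (PySem.Str.replace (PySem.Str.replace (PySem.Int.toStr e) "5" "") "0" "") = 0)) element = true
      then answer ++ [id element] else answer) := by
    funext a e
    simp
  rw [hfun, PySem.List.foldl_append_if, List.filter_filter]
  simp only [List.map_id, List.nil_append]
  rw [List.filter_congr (fun x _ => predA_eq x)]
  set ans := (PySem.List.pyRange l (r + 1) 1).filter (fun x => decide (0 ≤ x) && d05 x.toNat) with hans
  by_cases h : ans = []
  · rw [h]
    simp [PySem.List.len_eq]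
  · have : PySem.List.len ans ≠ 0 := by
      rw [PySem.List.len_eq]
      simpa [List.length_eq_zero_iff] using h
    rw [if_neg this, if_neg h]


lemma filters_eq (l r : Int) :
    (PySem.List.pyRange l (r + 1) 1).filter (fun x => decide (0 ≤ x) && d05 x.toNat)
      = (cands ((PySem.Str.len (PySem.Int.toStr (max r 0))).toNat)).filter
          (fun x => decide (l ≤ x) && decide (x ≤ r)) := by
  set K := (PySem.Str.len (PySem.Int.toStr (max r 0))).toNat with hK
  have hKlen : K = (dg (max r 0).toNat).length := by
    rw [hK, PySem.Str.len, PySem.Int.toList_toStr, toChars_nonneg _ (le_max_right r 0)]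
    simp
  have hrK : (max r 0).toNat < 10 ^ K := by rw [hKlen]; exact lt_pow_dg_len _
  have h1 : ((PySem.List.pyRange l (r + 1) 1).filter
      (fun x => decide (0 ≤ x) && d05 x.toNat)).Pairwise (· < ·) :=
    (PySem.List.pairwise_lt_pyRange_one l (r + 1)).filter _
  have h2 : ((cands K).filter (fun x => decide (l ≤ x) && decide (x ≤ r))).Pairwise (· < ·) :=
    (cands_pairwise K).filter _
  have hmem : ∀ x : Int,
      x ∈ (PySem.List.pyRange l (r + 1) 1).filter (fun x => decide (0 ≤ x) && d05 x.toNat)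
      ↔ x ∈ (cands K).filter (fun x => decide (l ≤ x) && decide (x ≤ r)) := by
    intro x
    simp only [List.mem_filter, PySem.List.mem_pyRange_one, mem_cands, Bool.and_eq_true,
      decide_eq_true_eq]
    constructor
    · rintro ⟨⟨hl, hr⟩, h0, hd⟩
      refine ⟨?_, hl, by omega⟩
      by_cases hx0 : x = 0
      · left; exact hx0
      · right
        have hx5 : 5 ≤ x := by
          by_contra hlt
          rw [d05_small x.toNat (by omega)] at hd
          simp at hd
          omega
        have hxK : x.toNat < 10 ^ K := by omega
        have hcK : ((10 ^ K : Nat) : Int) = 10 ^ K := by push_cast; ring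
        exact ⟨hx5, by omega, hd⟩
    · rintro ⟨hc, hl, hr⟩
      rcases hc with rfl | ⟨h5, _, hd⟩
      · exact ⟨⟨hl, by omega⟩, le_refl 0, d05_zero⟩
      · exact ⟨⟨hl, by omega⟩, by omega, hd⟩
  refine List.Perm.eq_of_sorted (le := (· < ·)) (fun a b _ _ h1 h2 => absurd h2 (by omega)) h1 h2 ?_
  rw [List.perm_ext_iff_of_nodup (h1.imp ne_of_lt) (h2.imp ne_of_lt)]
  exact hmem

-- ===== VERDICT (by name: the statement is the Claim_ definition above) =====
theorem solution_spec : Claim_equal_solution := by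
  intro l r _
  unfold Spec_solution solution_alt
  simp only [fold_eq_cands]
  rw [solution_eq_filter]
  unfold solutionA2
  simp only [filters_eq l r]
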